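-- pv_equiv track=rewrite | github.com/Kim-Tae-Yeong/Coding-Test | 프로그래머스/2/42626. 더 맵게/더 맵게.py | solution
-- ===== SOURCE A (Python) =====
-- import heapq as h
--
-- def solution(scoville, K):
--     answer = 0
--     length = len(scoville)
--     h.heapify(scoville)
--     while(scoville[0] < K):
--         if(length == 1):
--             answer = -1
--             break
--         answer += 1
--         no_hot_1 = h.heappop(scoville)
--         no_hot_2 = h.heappop(scoville)
--         mix = no_hot_1 + (no_hot_2 * 2)
--         h.heappush(scoville, mix)
--         length -= 1
--     return answer
-- ===== SOURCE B (Python) =====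
-- import bisect
--
-- def solution(scoville, K):
--     # Keeps a fully sorted list (in-place sort, then binary insertion) instead of a heap.
--     # Like A, mutates the argument list.
--     scoville.sort()
--     answer = 0
--     while scoville[0] < K:
--         if len(scoville) == 1:
--             return -1
--         mix = scoville[0] + 2 * scoville[1]
--         del scoville[:2]
--         bisect.insort(scoville, mix)
--         answer += 1
--     return answer
-- ===== Notes on version B (the rewrite author's own statement) =====
-- stated objective: alternative
-- what changed: Replaces the binary heap (heapq) by a fully sorted list maintained with bisect.insort binary insertion, popping the two front elements each round; like A it mutates the argument (sort vs heapify); return value is identical.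
import Mathlib
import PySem

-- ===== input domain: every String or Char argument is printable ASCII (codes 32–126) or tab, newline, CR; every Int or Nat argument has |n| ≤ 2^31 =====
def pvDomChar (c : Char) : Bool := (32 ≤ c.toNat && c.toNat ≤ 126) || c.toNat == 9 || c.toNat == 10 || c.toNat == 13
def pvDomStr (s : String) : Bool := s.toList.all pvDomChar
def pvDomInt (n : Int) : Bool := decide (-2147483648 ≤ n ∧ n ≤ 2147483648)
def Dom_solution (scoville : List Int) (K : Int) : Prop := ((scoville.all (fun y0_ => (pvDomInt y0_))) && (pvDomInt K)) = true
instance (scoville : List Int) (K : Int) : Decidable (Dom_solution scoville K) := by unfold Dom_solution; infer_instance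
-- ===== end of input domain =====

-- B replaces A's binary heap by a fully sorted list with binary insertion (alternative data
-- structure, same cost class); both versions mutate their argument in Python (heapify / sort),
-- the equivalence proved here is about the return value only.

-- ===== PORT A =====
-- heapq.heappop: the heap's contents are observed by A only through its minimum (scoville[0])
-- and pops, so the heap is modelled as its list of contents: heappop returns the minimum value
-- and the contents with one occurrence of it removed (exact for every value A's code computes).
def heapPop (heap : List Int) : Option (Int × List Int) :=
  match PySem.List.min? heap (fun x => x) with
  | none => none                      -- empty heap: Python raises IndexError
  | some m => some (m, heap.erase m)

theorem heapPop_length {xs : List Int} {m : Int} {r : List Int}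
    (h : heapPop xs = some (m, r)) : r.length + 1 = xs.length := by
  unfold heapPop at h
  cases hm : PySem.List.min? xs (fun x => x) with
  | none => simp [hm] at h
  | some m' =>
    simp [hm] at h
    obtain ⟨rfl, rfl⟩ := h
    have := PySem.List.min?_mem hm
    simpa using (List.length_erase_of_mem this).symm ▸
      (by have hpos : 0 < xs.length := List.length_pos_of_mem this
          omega : xs.length - 1 + 1 = xs.length)

-- the while loop of A: state = heap contents, answer
def solutionGo (heap : List Int) (K : Int) (answer : Int) : Int :=
  match h1 : heapPop heap with
  | none => answer                    -- unreachable: scoville[0] raises on the empty heap (outside Pre_)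
  | some (no_hot_1, rest1) =>
    if no_hot_1 < K then
      if heap.length = 1 then -1      -- 'answer = -1; break'
      else
        match h2 : heapPop rest1 with
        | none => answer              -- unreachable: length ≥ 2 here
        | some (no_hot_2, rest2) =>
          solutionGo ((no_hot_1 + no_hot_2 * 2) :: rest2) K (answer + 1)
    else answer
termination_by heap.length
decreasing_by
  have e1 := heapPop_length h1
  have e2 := heapPop_length h2
  simp only [List.length_cons]
  omega

def solution (scoville : List Int) (K : Int) : Int :=
  solutionGo scoville K 0

-- ===== PORT B =====
-- bisect.insort(xs, v): insert v into the sorted list xs, after any elements equal to v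
def insort (xs : List Int) (v : Int) : List Int :=
  PySem.List.insertBy (fun a b => decide (a < b)) v xs

-- the while loop of B: state = sorted list, answer
def solutionAltGo : List Int → Int → Int → Int
  | [], _, answer => answer           -- unreachable: scoville[0] raises on [] (outside Pre_)
  | [a], K, answer => if a < K then -1 else answer
  | a :: b :: t2, K, answer =>
    if a < K then solutionAltGo (insort t2 (a + 2 * b)) K (answer + 1) else answer
termination_by s _ _ => s.length
decreasing_by
  simp only [insort, List.length_cons]
  have : (PySem.List.insertBy (fun a b => decide (a < b)) (a + 2 * b) t2).length = t2.length + 1 := by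
    induction t2 with
    | nil => rfl
    | cons x xs ih => simp [PySem.List.insertBy]; split <;> simp [ih]
  omega

def solution_alt (scoville : List Int) (K : Int) : Int :=
  solutionAltGo (PySem.List.sorted scoville (fun x => x) false) K 0

-- ===== PRECONDITION & SPEC =====
-- Pre_ excludes only the empty list, on which A raises IndexError (scoville[0]).
def Pre_solution (scoville : List Int) (K : Int) : Prop := scoville ≠ []
instance (scoville : List Int) (K : Int) : Decidable (Pre_solution scoville K) := by unfold Pre_solution; infer_instance
def pvWitness_solution : List Int × Int := ([1, 2, 3, 9, 10, 12], 7)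

def Spec_solution (scoville : List Int) (K : Int) (out : Int) : Prop := out = solution_alt scoville K
instance (scoville : List Int) (K : Int) (out : Int) : Decidable (Spec_solution scoville K out) := by unfold Spec_solution; infer_instance

-- ===== CLAIM (what is proved, stated in full; the proofs are below) =====
def Claim_equal_solution : Prop := ∀ (scoville : List Int) (K : Int), Dom_solution scoville K → Pre_solution scoville K → Spec_solution scoville K (solution scoville K)

-- ===== LEMMAS AND PROOFS =====

theorem insort_perm (xs : List Int) (v : Int) : (insort xs v).Perm (v :: xs) := by
  induction xs with
  | nil => rfl
  | cons x t ih =>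
    simp only [insort, PySem.List.insertBy]
    split
    · rfl
    · exact ((ih.cons x).trans (List.Perm.swap v x t))

theorem insort_sorted {xs : List Int} (v : Int) (h : xs.Pairwise (· ≤ ·)) :
    (insort xs v).Pairwise (· ≤ ·) := by
  induction xs with
  | nil => simp [insort, PySem.List.insertBy]
  | cons x t ih =>
    simp only [insort, PySem.List.insertBy]
    rw [List.pairwise_cons] at h
    split
    · rename_i hlt
      simp only [decide_eq_true_eq] at hlt
      refine List.pairwise_cons.2 ⟨?_, List.pairwise_cons.2 h⟩
      intro y hy
      rcases List.mem_cons.1 hy with rfl | hy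
      · omega
      · have := h.1 y hy; omega
    · rename_i hnlt
      simp only [decide_eq_true_eq] at hnlt
      refine List.pairwise_cons.2 ⟨?_, ih h.2⟩
      intro y hy
      rw [PySem.List.mem_insertBy] at hy
      rcases hy with rfl | hy
      · omega
      · exact h.1 y hy

-- a heap whose contents are a permutation of the sorted list a :: t pops a
theorem heapPop_of_perm {h : List Int} {a : Int} {t : List Int}
    (hp : h.Perm (a :: t)) (hs : (a :: t).Pairwise (· ≤ ·)) :
    ∃ r, heapPop h = some (a, r) ∧ r.Perm t := by
  have hne : h ≠ [] := by
    intro he; subst he; exact (List.cons_ne_nil a t) hp.symm.eq_nil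
  cases hm : PySem.List.min? h (fun x => x) with
  | none => exact absurd ((PySem.List.min?_eq_none_iff h _).1 hm) hne
  | some m =>
    have hma : m = a := by
      have hmem : m ∈ h := PySem.List.min?_mem hm
      have hmin : ∀ y ∈ h, m ≤ y := by
        intro y hy; exact PySem.List.min?_isMin hm y hy
      have hain : a ∈ h := hp.mem_iff.2 (List.mem_cons_self ..)
      have h1 : m ≤ a := hmin a hain
      have h2 : a ≤ m := by
        have hm' : m ∈ a :: t := hp.mem_iff.1 hmem
        rcases hm' with _ | hm'
        · rfl
        · exact (List.pairwise_cons.1 hs).1 m (by assumption)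
      omega
    subst hma
    refine ⟨h.erase m, by simp [heapPop, hm], ?_⟩
    have := hp.erase m
    simpa using this

-- loop invariant: A's heap contents are a permutation of B's sorted list
theorem go_eq (K : Int) : ∀ n (h s : List Int) (ans : Int), h.length ≤ n →
    h.Perm s → s.Pairwise (· ≤ ·) →
    solutionGo h K ans = solutionAltGo s K ans := by
  intro n
  induction n with
  | zero =>
    intro h s ans hlen hp hs
    have : h = [] := List.length_eq_zero_iff.1 (Nat.le_zero.1 hlen)
    subst this
    have : s = [] := hp.symm.eq_nil
    subst this
    simp [solutionGo, solutionAltGo, heapPop, PySem.List.min?]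
  | succ n ih =>
    intro h s ans hlen hp hs
    cases s with
    | nil =>
      have : h = [] := hp.eq_nil
      subst this
      simp [solutionGo, solutionAltGo, heapPop, PySem.List.min?]
    | cons a t =>
      obtain ⟨r1, hpop1, hr1⟩ := heapPop_of_perm hp hs
      rw [solutionGo, hpop1]
      by_cases hK : a < K
      · simp only [if_pos hK]
        have hlen_eq : h.length = t.length + 1 := by
          simpa using hp.length_eq
        cases t with
        | nil =>
          have : h.length = 1 := by simp [hlen_eq]
          simp [this, solutionAltGo, hK]
        | cons b t2 =>
          have hne1 : ¬ h.length = 1 := by simp [hlen_eq]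
          simp only [if_neg hne1]
          have hs' : (b :: t2).Pairwise (· ≤ ·) := (List.pairwise_cons.1 hs).2
          obtain ⟨r2, hpop2, hr2⟩ := heapPop_of_perm hr1 hs'
          rw [hpop2, solutionAltGo, if_pos hK]
          have hperm : ((a + b * 2) :: r2).Perm (insort t2 (a + 2 * b)) := by
            have : (a + b * 2) = (a + 2 * b) := by ring
            rw [this]
            exact ((hr2.cons _).trans (insort_perm t2 (a + 2 * b)).symm)
          have hsorted : (insort t2 (a + 2 * b)).Pairwise (· ≤ ·) :=
            insort_sorted _ (List.pairwise_cons.1 hs').2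
          have hlen2 : r2.length + 1 = r1.length := heapPop_length hpop2
          have hlen1 : r1.length + 1 = h.length := heapPop_length hpop1
          exact ih ((a + b * 2) :: r2) _ (ans + 1) (by simp; omega) hperm hsorted
      · cases t <;> simp [solutionAltGo, if_neg hK]

-- ===== VERDICT (by name: the statement is the Claim_ definition above) =====
theorem solution_spec : Claim_equal_solution := by
  intro scoville K _ hpre
  unfold Spec_solution solution solution_alt
  exact go_eq K scoville.length scoville _ 0 le_rfl
    (PySem.List.sorted_perm scoville (fun x => x) false).symm
    (PySem.List.sorted_pairwise scoville (fun x => x))
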